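-- pv_equiv track=rewrite | github.com/idio-sync/rb3e-stagekit-networked | dashboard.py | parse_ini_format
-- ===== SOURCE A (Python) =====
-- def parse_ini_format(ini_data):
--     """Parse INI format song data from RB3Enhanced"""
--     songs = []
--     current_song = {}
--
--     for line in ini_data.split('\n'):
--         line = line.strip()
--         if not line:
--             continue
--
--         if line.startswith('[') and line.endswith(']'):
--             if current_song:
--                 songs.append(current_song)
--             current_song = {}
--         elif '=' in line:
--             key, value = line.split('=', 1)
--             current_song[key.strip()] = value.strip()
--
--     if current_song:
--         songs.append(current_song)
--
--     return songs
-- ===== SOURCE B (Python) =====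
-- def parse_ini_format(ini_data):
--     """Parse INI format song data: first partition lines into sections, then map each section to a dict."""
--     blocks = []
--     current = []
--     for raw in ini_data.split('\n'):
--         s = raw.strip()
--         if not s:
--             continue
--         if s.startswith('[') and s.endswith(']'):
--             blocks.append(current)
--             current = []
--         else:
--             current.append(s)
--     blocks.append(current)
--
--     songs = []
--     for block in blocks:
--         d = {}
--         for s in block:
--             if '=' in s:
--                 key, value = s.split('=', 1)
--                 d[key.strip()] = value.strip()
--         if d:
--             songs.append(d)
--     return songs
-- ===== Notes on version B (the rewrite author's own statement) =====
-- stated objective: alternative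
-- what changed: A builds song dicts in a single pass with a current-dict accumulator; B first partitions the stripped lines into section blocks, then maps each block to a dict and keeps the non-empty ones.
import Mathlib
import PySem

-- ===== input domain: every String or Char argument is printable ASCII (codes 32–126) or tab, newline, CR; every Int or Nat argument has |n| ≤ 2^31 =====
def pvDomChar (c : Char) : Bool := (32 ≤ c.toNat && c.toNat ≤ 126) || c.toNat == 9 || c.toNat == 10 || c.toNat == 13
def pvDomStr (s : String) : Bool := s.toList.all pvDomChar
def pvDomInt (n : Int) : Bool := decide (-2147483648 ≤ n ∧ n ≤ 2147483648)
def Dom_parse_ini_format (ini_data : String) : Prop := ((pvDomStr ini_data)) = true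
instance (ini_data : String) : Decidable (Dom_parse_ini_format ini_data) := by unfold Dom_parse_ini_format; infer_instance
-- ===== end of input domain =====

-- B re-decomposes A's single-pass dict accumulator into partition-lines-into-blocks then map-blocks-to-dicts (objective: alternative decomposition, same cost).

-- shared line-level helpers (identical code lines in both Pythons)
def pvIsHeader (s : String) : Bool :=
  PySem.Str.startswith s "[" && PySem.Str.endswith s "]"

-- "if '=' in line: key, value = line.split('=', 1); d[key.strip()] = value.strip()"
def pvInsLine (d : PySem.Dict String String) (s : String) : PySem.Dict String String :=
  if PySem.Str.isIn "=" s then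
    match PySem.Str.splitMax? s "=" 1 with
    | some (k :: v :: _) => d.insert (PySem.Str.strip k) (PySem.Str.strip v)
    | _ => d  -- unreachable: '=' in s gives at least two pieces
  else d

-- ===== PORT A =====
def pvA_step (st : List (List (String × String)) × PySem.Dict String String) (raw : String) :
    List (List (String × String)) × PySem.Dict String String :=
  let line := PySem.Str.strip raw
  if line = "" then st
  else if pvIsHeader line then
    ((if st.2.items ≠ [] then st.1 ++ [st.2.items] else st.1), PySem.Dict.empty)
  else (st.1, pvInsLine st.2 line)

def parse_ini_format (ini_data : String) : List (List (String × String)) :=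
  let st := ((PySem.Str.split? ini_data "\n").getD []).foldl pvA_step ([], PySem.Dict.empty)
  if st.2.items ≠ [] then st.1 ++ [st.2.items] else st.1

-- ===== PORT B =====
def pvB_blockStep (st : List (List String) × List String) (raw : String) :
    List (List String) × List String :=
  let s := PySem.Str.strip raw
  if s = "" then st
  else if pvIsHeader s then (st.1 ++ [st.2], [])
  else (st.1, st.2 ++ [s])

def pvB_blockDict (block : List String) : PySem.Dict String String :=
  block.foldl pvInsLine PySem.Dict.empty

def parse_ini_format_alt (ini_data : String) : List (List (String × String)) :=
  let st := ((PySem.Str.split? ini_data "\n").getD []).foldl pvB_blockStep ([], [])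
  let blocks := st.1 ++ [st.2]
  blocks.foldl (fun songs b =>
    if (pvB_blockDict b).items ≠ [] then songs ++ [(pvB_blockDict b).items] else songs) []

-- ===== PRECONDITION & SPEC =====
def Spec_parse_ini_format (ini_data : String) (out : List (List (String × String))) : Prop := out = parse_ini_format_alt ini_data
instance (ini_data : String) (out : List (List (String × String))) : Decidable (Spec_parse_ini_format ini_data out) := by unfold Spec_parse_ini_format; infer_instance

-- ===== CLAIM (what is proved, stated in full; the proofs are below) =====
def Claim_equal_parse_ini_format : Prop := ∀ (ini_data : String), Dom_parse_ini_format ini_data → Spec_parse_ini_format ini_data (parse_ini_format ini_data)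

-- ===== LEMMAS AND PROOFS =====

-- the dicts B extracts from a list of blocks (section dicts, empty ones dropped)
def pvDicts (blocks : List (List String)) : List (List (String × String)) :=
  (blocks.filter (fun b => (pvB_blockDict b).items ≠ [])).map (fun b => (pvB_blockDict b).items)

lemma pvDicts_snoc (bs : List (List String)) (c : List String) :
    pvDicts (bs ++ [c]) =
      if (pvB_blockDict c).items ≠ [] then pvDicts bs ++ [(pvB_blockDict c).items] else pvDicts bs := by
  by_cases h : (pvB_blockDict c).items = [] <;> simp [pvDicts, List.filter_append, h]

lemma pvBlockDict_snoc (b : List String) (s : String) :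
    pvB_blockDict (b ++ [s]) = pvInsLine (pvB_blockDict b) s := by
  simp [pvB_blockDict]

-- loop invariant: A's fold from (pvDicts blocks, dict-of-current-block) matches B's block fold
lemma pv_loop_inv (lines : List String) :
    ∀ (blocks : List (List String)) (cur : List String),
    (let stA := lines.foldl pvA_step (pvDicts blocks, pvB_blockDict cur)
     if stA.2.items ≠ [] then stA.1 ++ [stA.2.items] else stA.1)
    = (let stB := lines.foldl pvB_blockStep (blocks, cur)
       pvDicts (stB.1 ++ [stB.2])) := by
  induction lines with
  | nil =>
    intro blocks cur
    simp [pvDicts_snoc]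
  | cons l ls ih =>
    intro blocks cur
    simp only [List.foldl_cons]
    by_cases h0 : PySem.Str.strip l = ""
    · rw [show pvA_step (pvDicts blocks, pvB_blockDict cur) l = (pvDicts blocks, pvB_blockDict cur) by
            simp [pvA_step, h0],
          show pvB_blockStep (blocks, cur) l = (blocks, cur) by simp [pvB_blockStep, h0]]
      exact ih blocks cur
    · by_cases h1 : pvIsHeader (PySem.Str.strip l)
      · rw [show pvA_step (pvDicts blocks, pvB_blockDict cur) l
              = (pvDicts (blocks ++ [cur]), pvB_blockDict []) by
            simp [pvA_step, h0, h1, pvDicts_snoc, pvB_blockDict],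
          show pvB_blockStep (blocks, cur) l = (blocks ++ [cur], []) by
            simp [pvB_blockStep, h0, h1]]
        exact ih (blocks ++ [cur]) []
      · rw [show pvA_step (pvDicts blocks, pvB_blockDict cur) l
              = (pvDicts blocks, pvB_blockDict (cur ++ [PySem.Str.strip l])) by
            simp [pvA_step, h0, h1, pvBlockDict_snoc],
          show pvB_blockStep (blocks, cur) l = (blocks, cur ++ [PySem.Str.strip l]) by
            simp [pvB_blockStep, h0, h1]]
        exact ih blocks (cur ++ [PySem.Str.strip l])

-- ===== VERDICT (by name: the statement is the Claim_ definition above) =====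
theorem parse_ini_format_spec : Claim_equal_parse_ini_format := by
  intro ini_data _
  unfold Spec_parse_ini_format parse_ini_format parse_ini_format_alt
  have h := pv_loop_inv ((PySem.Str.split? ini_data "\n").getD []) [] []
  simp only [pvDicts, pvB_blockDict, List.foldl_nil, List.filter_nil, List.map_nil] at h
  rw [h]
  rw [PySem.List.foldl_append_ite (fun b => (pvB_blockDict b).items ≠ []) (fun b => (pvB_blockDict b).items)]
  simp [pvB_blockDict]
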